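-- pv_equiv track=rewrite | github.com/hth810/pythonlc | 力扣题单/枚举右，维护左/构成整天的下标对数目 II.py | countCompleteDayPairs
-- ===== SOURCE A (Python) =====
-- from typing import List
--
-- from collections import defaultdict
--
-- def countCompleteDayPairs(hours: List[int]) -> int:
--     cnt=defaultdict(int)
--     ans=0
--     for i,c in enumerate(hours):
--         a=c%24
--         if cnt[(24-a)%24]!=0:
--             ans+=cnt[(24-a)%24]
--         cnt[a]+=1
--     return ans
-- ===== SOURCE B (Python) =====
-- from typing import List
--
-- def countCompleteDayPairs(hours: List[int]) -> int:
--     cnt = {}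
--     for h in hours:
--         r = h % 24
--         cnt[r] = cnt.get(r, 0) + 1
--     c0 = cnt.get(0, 0)
--     c12 = cnt.get(12, 0)
--     ans = c0 * (c0 - 1) // 2 + c12 * (c12 - 1) // 2
--     for r in range(1, 12):
--         ans += cnt.get(r, 0) * cnt.get(24 - r, 0)
--     return ans
-- ===== Notes on version B (the rewrite author's own statement) =====
-- stated objective: alternative
-- what changed: Replaces A's incremental scan (maintaining a running dict of seen residues and adding the complement count at each element) with a histogram of hour%24 built in one pass followed by a fixed combinatorial pass over the 12 complementary residue pairs, using n*(n-1)//2 for the self-complementary residues 0 and 12.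
import Mathlib
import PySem

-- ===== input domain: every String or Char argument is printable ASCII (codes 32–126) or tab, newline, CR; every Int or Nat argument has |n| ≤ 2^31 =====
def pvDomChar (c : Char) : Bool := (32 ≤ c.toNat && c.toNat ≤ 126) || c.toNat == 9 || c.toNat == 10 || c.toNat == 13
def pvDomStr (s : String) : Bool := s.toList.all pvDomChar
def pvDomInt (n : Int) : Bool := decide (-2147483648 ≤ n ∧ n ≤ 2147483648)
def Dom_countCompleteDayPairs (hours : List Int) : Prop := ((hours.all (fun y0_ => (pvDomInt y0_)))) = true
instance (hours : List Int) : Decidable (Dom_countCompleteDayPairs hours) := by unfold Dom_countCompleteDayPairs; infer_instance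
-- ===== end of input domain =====

-- B replaces A's incremental complement-counting with a histogram of hour%24 followed by a fixed
-- combinatorial pass over the 12 complementary residue pairs (objective: alternative decomposition).

-- ===== PORT A =====
-- loop body of A: a = c % 24; if cnt[(24-a)%24] != 0: ans += cnt[(24-a)%24]; cnt[a] += 1
-- (the defaultdict read inserts a 0 entry for a missing key; that entry never changes any later
-- read value, so the port reads with getD 0, which is value-exact)
def pvStepA (st : PySem.Dict Int Int × Int) (c : Int) : PySem.Dict Int Int × Int :=
  let a := PySem.Int.mod c 24
  let comp := PySem.Int.mod (24 - a) 24
  let ans := if st.1.getD comp 0 ≠ 0 then st.2 + st.1.getD comp 0 else st.2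
  (st.1.insert a (st.1.getD a 0 + 1), ans)

-- the enumerate index i is unused in A, so the loop is ported directly over the values
def countCompleteDayPairs (hours : List Int) : Int :=
  (hours.foldl pvStepA (PySem.Dict.empty, 0)).2

-- ===== PORT B =====
-- histogram pass of B: cnt[r] = cnt.get(r, 0) + 1 for r = h % 24
def pvStepB (d : PySem.Dict Int Int) (h : Int) : PySem.Dict Int Int :=
  d.insert (PySem.Int.mod h 24) (d.getD (PySem.Int.mod h 24) 0 + 1)

def countCompleteDayPairs_alt (hours : List Int) : Int :=
  let cnt := hours.foldl pvStepB PySem.Dict.empty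
  let c0 := cnt.getD 0 0
  let c12 := cnt.getD 12 0
  let ans := PySem.Int.floordiv (c0 * (c0 - 1)) 2 + PySem.Int.floordiv (c12 * (c12 - 1)) 2
  (PySem.List.pyRange 1 12 1).foldl
    (fun ans r => ans + cnt.getD r 0 * cnt.getD (24 - r) 0) ans

-- ===== PRECONDITION & SPEC =====
def Spec_countCompleteDayPairs (hours : List Int) (out : Int) : Prop := out = countCompleteDayPairs_alt hours
instance (hours : List Int) (out : Int) : Decidable (Spec_countCompleteDayPairs hours out) := by unfold Spec_countCompleteDayPairs; infer_instance

-- ===== CLAIM (what is proved, stated in full; the proofs are below) =====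
def Claim_equal_countCompleteDayPairs : Prop := ∀ (hours : List Int), Dom_countCompleteDayPairs hours → Spec_countCompleteDayPairs hours (countCompleteDayPairs hours)

-- ===== LEMMAS AND PROOFS =====

-- number of elements of xs with residue r modulo 24
def pvHist (xs : List Int) (r : Int) : Int :=
  ((xs.map (fun h => PySem.Int.mod h 24)).count r : Int)

-- pairs within one self-complementary bucket: n*(n-1)//2
def pvCh (n : Int) : Int := PySem.Int.floordiv (n * (n - 1)) 2

-- the closed-form value both programs compute
def pvG (xs : List Int) : Int :=
  pvCh (pvHist xs 0) + pvCh (pvHist xs 12)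
    + (pvHist xs 1 * pvHist xs 23 + pvHist xs 2 * pvHist xs 22 + pvHist xs 3 * pvHist xs 21
       + pvHist xs 4 * pvHist xs 20 + pvHist xs 5 * pvHist xs 19 + pvHist xs 6 * pvHist xs 18
       + pvHist xs 7 * pvHist xs 17 + pvHist xs 8 * pvHist xs 16 + pvHist xs 9 * pvHist xs 15
       + pvHist xs 10 * pvHist xs 14 + pvHist xs 11 * pvHist xs 13)

lemma pvCh_succ (n : Int) : pvCh (n + 1) = pvCh n + n := by
  simp only [pvCh, PySem.Int.floordiv_eq_ediv_of_pos (show (0:Int) < 2 by norm_num)]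
  have h : (n + 1) * (n + 1 - 1) = n * (n - 1) + n * 2 := by ring
  rw [h, Int.add_mul_ediv_right _ _ (show (2:Int) ≠ 0 by norm_num)]

lemma pvHist_append (xs : List Int) (c r : Int) :
    pvHist (xs ++ [c]) r = pvHist xs r + (if PySem.Int.mod c 24 = r then 1 else 0) := by
  simp only [pvHist, List.map_append, List.map_cons, List.map_nil, List.count_append]
  rw [List.count_singleton]
  split <;> split <;> simp_all [beq_iff_eq]

lemma getD_foldl_stepB (xs : List Int) (r : Int) :
    (xs.foldl pvStepB PySem.Dict.empty).getD r 0 = pvHist xs r := by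
  have gen : ∀ (ys : List Int) (d : PySem.Dict Int Int) (r : Int),
      (ys.foldl pvStepB d).getD r 0 = d.getD r 0 + pvHist ys r := by
    intro ys
    induction ys with
    | nil => intro d r; simp [pvHist]
    | cons y ys ih =>
      intro d r
      simp only [List.foldl_cons, ih, pvStepB, pvHist, List.map_cons, List.count_cons,
        PySem.Dict.getD_insert]
      split <;> split <;> first | (simp_all [beq_iff_eq]; ring1) | simp_all [beq_iff_eq]
  rw [gen]
  simp

lemma fst_foldl_stepA (xs : List Int) (d : PySem.Dict Int Int) (a0 : Int) :
    (xs.foldl pvStepA (d, a0)).1 = xs.foldl pvStepB d := by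
  induction xs generalizing d a0 with
  | nil => rfl
  | cons x xs ih => simp [List.foldl_cons, pvStepA, pvStepB, ih]

lemma pvG_append (xs : List Int) (c : Int) :
    pvG (xs ++ [c]) = pvG xs + pvHist xs (PySem.Int.mod (24 - PySem.Int.mod c 24) 24) := by
  have h0 : 0 ≤ PySem.Int.mod c 24 := PySem.Int.mod_nonneg c (by norm_num)
  have h1 : PySem.Int.mod c 24 < 24 := PySem.Int.mod_lt c (by norm_num)
  simp only [pvG, pvHist_append]
  generalize PySem.Int.mod c 24 = a at h0 h1 ⊢
  interval_cases a <;>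
    norm_num [PySem.Int.mod_eq_emod_of_pos (show (0:Int) < 24 by norm_num)] <;>
    first
      | ring1
      | (rw [pvCh_succ]; ring1)

lemma alt_eq_pvG (xs : List Int) : countCompleteDayPairs_alt xs = pvG xs := by
  unfold countCompleteDayPairs_alt
  rw [show PySem.List.pyRange 1 12 1 = [1,2,3,4,5,6,7,8,9,10,11] from by decide]
  simp only [List.foldl_cons, List.foldl_nil, getD_foldl_stepB]
  unfold pvG pvCh
  norm_num
  ring

lemma a_eq_pvG (xs : List Int) : countCompleteDayPairs xs = pvG xs := by
  induction xs using List.reverseRecOn with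
  | nil => decide
  | append_singleton xs c ih =>
    unfold countCompleteDayPairs at *
    rw [List.foldl_append]
    simp only [List.foldl_cons, List.foldl_nil]
    rw [pvG_append]
    rcases hst : xs.foldl pvStepA (PySem.Dict.empty, 0) with ⟨d, ans⟩
    have hd : d = xs.foldl pvStepB PySem.Dict.empty := by
      have := fst_foldl_stepA xs PySem.Dict.empty 0
      rw [hst] at this; exact this
    have hans : ans = pvG xs := by rw [← ih, hst]
    simp only [pvStepA, hd, getD_foldl_stepB, hans]
    split <;> omega

-- ===== VERDICT (by name: the statement is the Claim_ definition above) =====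
theorem countCompleteDayPairs_spec : Claim_equal_countCompleteDayPairs := by
  intro hours _
  unfold Spec_countCompleteDayPairs
  rw [a_eq_pvG, alt_eq_pvG]
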